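/- GENERATED by tools/from_farm_form.py from prooffarm-gif/accepted/DGifBufferedInput.3/Proof.lean (a worked proof of the farm's unit `DGifBufferedInput.3`,
   accepted by the verdict) — do not edit. -/
import Gif.Spec.Units.DGifBufferedInput_3
import Gif.Spec.AllSegs
import Gif.Spec.Proved.DGifBufferedInput_3_Lemmas

open X86 X86.User Asan ProgX.Base ProgX.Base.Spec Gif.Spec

/-!
  `DGifBufferedInput.3` (0x1065fe … 0x106666, 26 instructions; dgif_lib.c:1135-1141): A BODY SEGMENT OF A FUNCTION WITHOUT A
  PROTECTED FRAME, WITH A CALL IN THE MIDDLE. The call's return address 0x10660d (`ret9`) is not a cut of the design, so the unit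
  makes it one of its own: a private assertion `bi3_AtRet9` (`Body` + what is live there) and two walks (Lemmas.lean), chained here.
-/

/-- Segment 3 of `DGifBufferedInput` takes `AfterLen` at 0x1065fe to `Done` at 0x10659d. -/
theorem Gif.Spec.Proved.DGifBufferedInput_3_ok : Gif.Spec.DGifBufferedInput_3.Statement := by
  intro Lay hLay μ hμ u₀ hcode h_InternalRead h_asan_load1_noabort h_asan_store1_noabort h_asan_store4_noabort
  intro H rest frames F R e ret v hat
  -- the callee's contract for the same frame list (no frame of its own) and the request of `Buf[0]` bytes
  have hir := h_InternalRead H rest frames F R (rd v.mem (F.pv + 88) 1)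
  -- 0x1065fe … the call of InternalRead … 0x10660d (dgif_lib.c:1135)
  refine (Gif.Spec.DGifBufferedInput_3.bi3_seg_call Lay hLay μ hμ u₀ hcode H rest frames F R e ret v hir hat).trans ?_
  -- 0x10660d … 0x10659d (dgif_lib.c:1135-1141, both arms)
  intro v1 hv1
  exact Gif.Spec.DGifBufferedInput_3.bi3_seg_tail Lay hLay μ hμ u₀ hcode H rest frames F R e ret h_asan_load1_noabort
    h_asan_store1_noabort h_asan_store4_noabort v1 hv1
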